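-- pv_equiv track=rewrite | github.com/pawoos/simplemind-oct | simplemind/example_output/runtime/clahe_image-image_norm-85eeb56c-7d6293b3/sm_tool.py | _get_sample_tags
-- ===== SOURCE A (Python) =====
-- def _get_sample_tags(msg_tags: list[str]) -> list[str]:
--     """
--     Extracts sample metadata (dataset, sample, total) from a message's labels.
--     Returns None if each tag is not present exactly once in the message.
--     """
--     dataset_tags = [tag for tag in msg_tags if tag.startswith("dataset:")]
--     sample_tags = [tag for tag in msg_tags if tag.startswith("sample:")]
--     total_tags = [tag for tag in msg_tags if tag.startswith("total:")]
--
--     if len(dataset_tags) == len(sample_tags) == len(total_tags) == 1: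
--         return dataset_tags + sample_tags + total_tags
--     else:
--         return None
-- ===== SOURCE B (Python) =====
-- def _get_sample_tags(msg_tags: list[str]) -> list[str]:
--     """Single dispatch pass building all three buckets, then one length check."""
--     dataset, sample, total = [], [], []
--     for tag in msg_tags:
--         if tag.startswith("dataset:"):
--             dataset.append(tag)
--         elif tag.startswith("sample:"):
--             sample.append(tag)
--         elif tag.startswith("total:"):
--             total.append(tag)
--     if len(dataset) == len(sample) == len(total) == 1:
--         return dataset + sample + total
--     return None
-- ===== Notes on version B (the rewrite author's own statement) =====
-- stated objective: simpler
-- what changed: Three separate filtering comprehensions over msg_tags are replaced by one dispatch pass that routes each tag into its bucket (dataset/sample/total) via a single if/elif chain, then one length check.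
import Mathlib
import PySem

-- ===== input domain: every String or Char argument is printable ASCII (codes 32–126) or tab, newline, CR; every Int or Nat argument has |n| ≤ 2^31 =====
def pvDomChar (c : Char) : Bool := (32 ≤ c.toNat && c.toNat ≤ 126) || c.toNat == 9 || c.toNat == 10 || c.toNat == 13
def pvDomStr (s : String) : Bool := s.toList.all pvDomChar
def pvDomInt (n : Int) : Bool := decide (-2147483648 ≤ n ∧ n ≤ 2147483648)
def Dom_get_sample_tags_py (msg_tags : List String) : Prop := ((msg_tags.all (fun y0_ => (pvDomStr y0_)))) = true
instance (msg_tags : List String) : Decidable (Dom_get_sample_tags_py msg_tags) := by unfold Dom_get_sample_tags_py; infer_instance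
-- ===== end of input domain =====

-- B replaces A's three separate filter passes by one dispatch pass filling all three buckets (objective: simpler).

-- ===== PORT A =====
def get_sample_tags_py (msg_tags : List String) : Option (List String) :=
  let dataset_tags := msg_tags.filter (fun tag => PySem.Str.startswith tag "dataset:")
  let sample_tags := msg_tags.filter (fun tag => PySem.Str.startswith tag "sample:")
  let total_tags := msg_tags.filter (fun tag => PySem.Str.startswith tag "total:")
  if dataset_tags.length = sample_tags.length ∧ sample_tags.length = total_tags.length ∧ total_tags.length = 1 then
    some (dataset_tags ++ sample_tags ++ total_tags)
  else
    none

-- ===== PORT B =====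
def get_sample_tags_py_altStep (acc : List String × List String × List String) (tag : String) :
    List String × List String × List String :=
  if PySem.Str.startswith tag "dataset:" then (acc.1 ++ [tag], acc.2.1, acc.2.2)
  else if PySem.Str.startswith tag "sample:" then (acc.1, acc.2.1 ++ [tag], acc.2.2)
  else if PySem.Str.startswith tag "total:" then (acc.1, acc.2.1, acc.2.2 ++ [tag])
  else acc

def get_sample_tags_py_alt (msg_tags : List String) : Option (List String) :=
  let buckets := msg_tags.foldl get_sample_tags_py_altStep ([], [], [])
  if buckets.1.length = buckets.2.1.length ∧ buckets.2.1.length = buckets.2.2.length ∧ buckets.2.2.length = 1 then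
    some (buckets.1 ++ buckets.2.1 ++ buckets.2.2)
  else
    none

-- ===== PRECONDITION & SPEC =====
def Spec_get_sample_tags_py (msg_tags : List String) (out : Option (List String)) : Prop := out = get_sample_tags_py_alt msg_tags
instance (msg_tags : List String) (out : Option (List String)) : Decidable (Spec_get_sample_tags_py msg_tags out) := by unfold Spec_get_sample_tags_py; infer_instance

-- ===== CLAIM (what is proved, stated in full; the proofs are below) =====
def Claim_equal_get_sample_tags_py : Prop := ∀ (msg_tags : List String), Dom_get_sample_tags_py msg_tags → Spec_get_sample_tags_py msg_tags (get_sample_tags_py msg_tags)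

-- ===== LEMMAS AND PROOFS =====

-- two distinct nonempty prefixes with different first characters cannot both be prefixes of the same string
theorem pv_prefix_head_ne {p q l : List Char} (hp : p <+: l) (hq : q <+: l)
    (h : p.head? ≠ q.head?) (hpn : p ≠ []) (hqn : q ≠ []) : False := by
  obtain ⟨u, hu⟩ := hp
  obtain ⟨v, hv⟩ := hq
  cases p with
  | nil => exact hpn rfl
  | cons a p' =>
    cases q with
    | nil => exact hqn rfl
    | cons b q' =>
      subst hu
      simp only [List.cons_append, List.cons.injEq] at hv
      exact h (by simp [hv.1])

theorem pv_ds_not_sample (t : String) (h : PySem.Str.startswith t "dataset:" = true) :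
    PySem.Str.startswith t "sample:" = false := by
  by_contra hne
  rw [Bool.not_eq_false] at hne
  simp only [PySem.Str.startswith_eq, PySem.Chars.startswith_iff] at h hne
  exact pv_prefix_head_ne h hne (by decide) (by decide) (by decide)

theorem pv_ds_not_total (t : String) (h : PySem.Str.startswith t "dataset:" = true) :
    PySem.Str.startswith t "total:" = false := by
  by_contra hne
  rw [Bool.not_eq_false] at hne
  simp only [PySem.Str.startswith_eq, PySem.Chars.startswith_iff] at h hne
  exact pv_prefix_head_ne h hne (by decide) (by decide) (by decide)

theorem pv_sample_not_total (t : String) (h : PySem.Str.startswith t "sample:" = true) :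
    PySem.Str.startswith t "total:" = false := by
  by_contra hne
  rw [Bool.not_eq_false] at hne
  simp only [PySem.Str.startswith_eq, PySem.Chars.startswith_iff] at h hne
  exact pv_prefix_head_ne h hne (by decide) (by decide) (by decide)

-- the single-pass fold computes the three filters of A, appended to the running accumulators
theorem pv_fold_eq_filters (l : List String) : ∀ (ds ss ts : List String),
    l.foldl get_sample_tags_py_altStep (ds, ss, ts) =
      (ds ++ l.filter (fun tag => PySem.Str.startswith tag "dataset:"),
       ss ++ l.filter (fun tag => PySem.Str.startswith tag "sample:"),
       ts ++ l.filter (fun tag => PySem.Str.startswith tag "total:")) := by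
  induction l with
  | nil => intro ds ss ts; simp
  | cons t l ih =>
    intro ds ss ts
    simp only [List.foldl_cons, List.filter_cons]
    by_cases hd : PySem.Str.startswith t "dataset:" = true
    · have h1 := hd; have h2 := pv_ds_not_sample t hd; have h3 := pv_ds_not_total t hd
      simp only [PySem.Str.startswith_eq, show "dataset:".toList = ['d','a','t','a','s','e','t',':'] from rfl, show "sample:".toList = ['s','a','m','p','l','e',':'] from rfl, show "total:".toList = ['t','o','t','a','l',':'] from rfl] at h1 h2 h3
      rw [show get_sample_tags_py_altStep (ds, ss, ts) t = (ds ++ [t], ss, ts) by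
        simp [get_sample_tags_py_altStep, h1]]
      rw [ih]
      simp [h1, h2, h3]
    · by_cases hs : PySem.Str.startswith t "sample:" = true
      · have h1 := hd; have h2 := hs; have h3 := pv_sample_not_total t hs
        simp only [PySem.Str.startswith_eq, Bool.not_eq_true, show "dataset:".toList = ['d','a','t','a','s','e','t',':'] from rfl, show "sample:".toList = ['s','a','m','p','l','e',':'] from rfl, show "total:".toList = ['t','o','t','a','l',':'] from rfl] at h1 h2 h3
        rw [show get_sample_tags_py_altStep (ds, ss, ts) t = (ds, ss ++ [t], ts) by
          simp [get_sample_tags_py_altStep, h1, h2]]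
        rw [ih]
        simp [h1, h2, h3]
      · by_cases ht : PySem.Str.startswith t "total:" = true
        · have h1 := hd; have h2 := hs; have h3 := ht
          simp only [PySem.Str.startswith_eq, Bool.not_eq_true, show "dataset:".toList = ['d','a','t','a','s','e','t',':'] from rfl, show "sample:".toList = ['s','a','m','p','l','e',':'] from rfl, show "total:".toList = ['t','o','t','a','l',':'] from rfl] at h1 h2 h3
          rw [show get_sample_tags_py_altStep (ds, ss, ts) t = (ds, ss, ts ++ [t]) by
            simp [get_sample_tags_py_altStep, h1, h2, h3]]
          rw [ih]
          simp [h1, h2, h3]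
        · have h1 := hd; have h2 := hs; have h3 := ht
          simp only [PySem.Str.startswith_eq, Bool.not_eq_true, show "dataset:".toList = ['d','a','t','a','s','e','t',':'] from rfl, show "sample:".toList = ['s','a','m','p','l','e',':'] from rfl, show "total:".toList = ['t','o','t','a','l',':'] from rfl] at h1 h2 h3
          rw [show get_sample_tags_py_altStep (ds, ss, ts) t = (ds, ss, ts) by
            simp [get_sample_tags_py_altStep, h1, h2, h3]]
          rw [ih]
          simp [h1, h2, h3]

-- ===== VERDICT (by name: the statement is the Claim_ definition above) =====
theorem get_sample_tags_py_spec : Claim_equal_get_sample_tags_py := by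
  intro msg_tags _
  unfold Spec_get_sample_tags_py get_sample_tags_py get_sample_tags_py_alt
  rw [pv_fold_eq_filters msg_tags [] [] []]
  simp
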